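-- pv_equiv track=rewrite | github.com/dharmanextsteps/GAMADV-XTD3 | src/gamlib/glskus.py | normalizeProductId
-- ===== SOURCE A (Python) =====
-- _SKUS = {
--   'Google-Apps-For-Business': {
--     'product': 'Google-Apps', 'aliases': ['gafb', 'gafw', 'basic', 'gsuitebasic'], 'displayName': 'G Suite Basic'},
--   'Google-Apps-For-Government': {
--     'product': 'Google-Apps', 'aliases': ['gafg', 'gsuitegovernment', 'gsuitegov'], 'displayName': 'G Suite Government'},
--   'Google-Apps-For-Postini': {
--     'product': 'Google-Apps', 'aliases': ['gams', 'postini', 'gsuitegams', 'gsuitepostini', 'gsuitemessagesecurity'], 'displayName': 'G Suite Message Security'},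
--   'Google-Apps-Lite': {
--     'product': 'Google-Apps', 'aliases': ['gal', 'lite', 'gsuitelite'], 'displayName': 'G Suite Lite'},
--   'Google-Apps-Unlimited': {
--     'product': 'Google-Apps', 'aliases': ['gau', 'unlimited', 'gsuitebusiness'], 'displayName': 'G Suite Business'},
--   '1010020020': {
--     'product': 'Google-Apps', 'aliases': ['gae', 'enterprise', 'gsuiteenterprise'], 'displayName': 'G Suite Enterprise'},
--   'Google-Drive-storage-20GB': {
--     'product': 'Google-Drive-storage', 'aliases': ['drive20gb', '20gb', 'googledrivestorage20gb'], 'displayName': 'Google Drive Storage 20GB'},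
--   'Google-Drive-storage-50GB': {
--     'product': 'Google-Drive-storage', 'aliases': ['drive50gb', '50gb', 'googledrivestorage50gb'], 'displayName': 'Google Drive Storage 50GB'},
--   'Google-Drive-storage-200GB': {
--     'product': 'Google-Drive-storage', 'aliases': ['drive200gb', '200gb', 'googledrivestorage200gb'], 'displayName': 'Google Drive Storage 200GB'},
--   'Google-Drive-storage-400GB': {
--     'product': 'Google-Drive-storage', 'aliases': ['drive400gb', '400gb', 'googledrivestorage400gb'], 'displayName': 'Google Drive Storage 400GB'},
--   'Google-Drive-storage-1TB': {
--     'product': 'Google-Drive-storage', 'aliases': ['drive1tb', '1tb', 'googledrivestorage1tb'], 'displayName': 'Google Drive Storage 1TB'},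
--   'Google-Drive-storage-2TB': {
--     'product': 'Google-Drive-storage', 'aliases': ['drive2tb', '2tb', 'googledrivestorage2tb'], 'displayName': 'Google Drive Storage 2TB'},
--   'Google-Drive-storage-4TB': {
--     'product': 'Google-Drive-storage', 'aliases': ['drive4tb', '4tb', 'googledrivestorage4tb'], 'displayName': 'Google Drive Storage 4TB'},
--   'Google-Drive-storage-8TB': {
--     'product': 'Google-Drive-storage', 'aliases': ['drive8tb', '8tb', 'googledrivestorage8tb'], 'displayName': 'Google Drive Storage 8TB'},
--   'Google-Drive-storage-16TB': {
--     'product': 'Google-Drive-storage', 'aliases': ['drive16tb', '16tb', 'googledrivestorage16tb'], 'displayName': 'Google Drive Storage 16TB'},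
--   'Google-Vault': {
--     'product': 'Google-Vault', 'aliases': ['vault', 'googlevault'], 'displayName': 'Google Vault'},
--   'Google-Vault-Former-Employee': {
--     'product': 'Google-Vault', 'aliases': ['vfe', 'googlevaultformeremployee'], 'displayName': 'Google Vault Former Employee'},
--   'Google-Coordinate': {
--     'product': 'Google-Coordinate', 'aliases': ['coordinate', 'googlecoordinate'], 'displayName': 'Google Coordinate'},
--   'Google-Chrome-Device-Management': {
--     'product': 'Google-Chrome-Device-Management', 'aliases': ['chrome', 'cdm', 'googlechromedevicemanagement'], 'displayName': 'Google Chrome Device Management'}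
--   }
--
-- def normalizeProductId(product):
--   l_product = product.lower().replace('-', '').replace(' ', '')
--   for a_sku, sku_values in list(_SKUS.items()):
--     if ((l_product == sku_values['product'].lower().replace('-', ''))
--         or (l_product == a_sku.lower().replace('-', ''))
--         or (l_product in sku_values['aliases'])
--         or (l_product == sku_values['displayName'].lower().replace(' ', ''))):
--       return sku_values['product']
--   return product
-- ===== SOURCE B (Python) =====
-- # Flat reverse-lookup table: every recognized key (normalized product, normalized
-- # SKU id, alias, normalized display name) maps to its canonical product id.
-- # Precomputed from the _SKUS data; no key maps to two different products, so a
-- # plain dict literal is exact.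
-- _PRODUCT_MAP = {
--   'googleapps': 'Google-Apps',
--   'googleappsforbusiness': 'Google-Apps',
--   'gafb': 'Google-Apps',
--   'gafw': 'Google-Apps',
--   'basic': 'Google-Apps',
--   'gsuitebasic': 'Google-Apps',
--   'googleappsforgovernment': 'Google-Apps',
--   'gafg': 'Google-Apps',
--   'gsuitegovernment': 'Google-Apps',
--   'gsuitegov': 'Google-Apps',
--   'googleappsforpostini': 'Google-Apps',
--   'gams': 'Google-Apps',
--   'postini': 'Google-Apps',
--   'gsuitegams': 'Google-Apps',
--   'gsuitepostini': 'Google-Apps',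
--   'gsuitemessagesecurity': 'Google-Apps',
--   'googleappslite': 'Google-Apps',
--   'gal': 'Google-Apps',
--   'lite': 'Google-Apps',
--   'gsuitelite': 'Google-Apps',
--   'googleappsunlimited': 'Google-Apps',
--   'gau': 'Google-Apps',
--   'unlimited': 'Google-Apps',
--   'gsuitebusiness': 'Google-Apps',
--   '1010020020': 'Google-Apps',
--   'gae': 'Google-Apps',
--   'enterprise': 'Google-Apps',
--   'gsuiteenterprise': 'Google-Apps',
--   'googledrivestorage': 'Google-Drive-storage',
--   'googledrivestorage20gb': 'Google-Drive-storage',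
--   'drive20gb': 'Google-Drive-storage',
--   '20gb': 'Google-Drive-storage',
--   'googledrivestorage50gb': 'Google-Drive-storage',
--   'drive50gb': 'Google-Drive-storage',
--   '50gb': 'Google-Drive-storage',
--   'googledrivestorage200gb': 'Google-Drive-storage',
--   'drive200gb': 'Google-Drive-storage',
--   '200gb': 'Google-Drive-storage',
--   'googledrivestorage400gb': 'Google-Drive-storage',
--   'drive400gb': 'Google-Drive-storage',
--   '400gb': 'Google-Drive-storage',
--   'googledrivestorage1tb': 'Google-Drive-storage',
--   'drive1tb': 'Google-Drive-storage',
--   '1tb': 'Google-Drive-storage',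
--   'googledrivestorage2tb': 'Google-Drive-storage',
--   'drive2tb': 'Google-Drive-storage',
--   '2tb': 'Google-Drive-storage',
--   'googledrivestorage4tb': 'Google-Drive-storage',
--   'drive4tb': 'Google-Drive-storage',
--   '4tb': 'Google-Drive-storage',
--   'googledrivestorage8tb': 'Google-Drive-storage',
--   'drive8tb': 'Google-Drive-storage',
--   '8tb': 'Google-Drive-storage',
--   'googledrivestorage16tb': 'Google-Drive-storage',
--   'drive16tb': 'Google-Drive-storage',
--   '16tb': 'Google-Drive-storage',
--   'googlevault': 'Google-Vault',
--   'vault': 'Google-Vault',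
--   'googlevaultformeremployee': 'Google-Vault',
--   'vfe': 'Google-Vault',
--   'googlecoordinate': 'Google-Coordinate',
--   'coordinate': 'Google-Coordinate',
--   'googlechromedevicemanagement': 'Google-Chrome-Device-Management',
--   'chrome': 'Google-Chrome-Device-Management',
--   'cdm': 'Google-Chrome-Device-Management',
-- }
--
-- def normalizeProductId(product):
--   l_product = product.lower().replace('-', '').replace(' ', '')
--   return _PRODUCT_MAP.get(l_product, product)
-- ===== Notes on version B (the rewrite author's own statement) =====
-- stated objective: idiomatic
-- what changed: Replaces the per-call linear scan over _SKUS with its four-way field comparison per entry by a flat precomputed reverse-lookup dict literal (normalized key -> product; no key ever maps to two products), so each call is normalize-then-one-dict-get.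
import Mathlib
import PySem

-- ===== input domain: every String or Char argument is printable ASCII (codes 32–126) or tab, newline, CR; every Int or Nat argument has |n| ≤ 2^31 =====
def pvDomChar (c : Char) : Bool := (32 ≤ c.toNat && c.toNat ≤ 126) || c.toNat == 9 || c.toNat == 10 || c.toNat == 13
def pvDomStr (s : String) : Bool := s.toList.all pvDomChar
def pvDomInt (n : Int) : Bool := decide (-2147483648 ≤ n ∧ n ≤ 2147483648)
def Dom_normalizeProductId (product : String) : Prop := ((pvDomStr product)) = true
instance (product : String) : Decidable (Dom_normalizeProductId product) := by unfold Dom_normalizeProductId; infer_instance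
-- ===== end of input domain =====

-- ===== PORT A =====
-- B replaces A's per-call linear scan of _SKUS (four comparisons per entry) by a flat
-- precomputed reverse-lookup dict literal queried once per call; return value only.

-- the module-level _SKUS table: (a_sku, product, aliases, displayName), in insertion order
def skuTable : List (String × String × List String × String) :=
  [ ("Google-Apps-For-Business", "Google-Apps", ["gafb", "gafw", "basic", "gsuitebasic"], "G Suite Basic"),
    ("Google-Apps-For-Government", "Google-Apps", ["gafg", "gsuitegovernment", "gsuitegov"], "G Suite Government"),
    ("Google-Apps-For-Postini", "Google-Apps", ["gams", "postini", "gsuitegams", "gsuitepostini", "gsuitemessagesecurity"], "G Suite Message Security"),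
    ("Google-Apps-Lite", "Google-Apps", ["gal", "lite", "gsuitelite"], "G Suite Lite"),
    ("Google-Apps-Unlimited", "Google-Apps", ["gau", "unlimited", "gsuitebusiness"], "G Suite Business"),
    ("1010020020", "Google-Apps", ["gae", "enterprise", "gsuiteenterprise"], "G Suite Enterprise"),
    ("Google-Drive-storage-20GB", "Google-Drive-storage", ["drive20gb", "20gb", "googledrivestorage20gb"], "Google Drive Storage 20GB"),
    ("Google-Drive-storage-50GB", "Google-Drive-storage", ["drive50gb", "50gb", "googledrivestorage50gb"], "Google Drive Storage 50GB"),
    ("Google-Drive-storage-200GB", "Google-Drive-storage", ["drive200gb", "200gb", "googledrivestorage200gb"], "Google Drive Storage 200GB"),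
    ("Google-Drive-storage-400GB", "Google-Drive-storage", ["drive400gb", "400gb", "googledrivestorage400gb"], "Google Drive Storage 400GB"),
    ("Google-Drive-storage-1TB", "Google-Drive-storage", ["drive1tb", "1tb", "googledrivestorage1tb"], "Google Drive Storage 1TB"),
    ("Google-Drive-storage-2TB", "Google-Drive-storage", ["drive2tb", "2tb", "googledrivestorage2tb"], "Google Drive Storage 2TB"),
    ("Google-Drive-storage-4TB", "Google-Drive-storage", ["drive4tb", "4tb", "googledrivestorage4tb"], "Google Drive Storage 4TB"),
    ("Google-Drive-storage-8TB", "Google-Drive-storage", ["drive8tb", "8tb", "googledrivestorage8tb"], "Google Drive Storage 8TB"),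
    ("Google-Drive-storage-16TB", "Google-Drive-storage", ["drive16tb", "16tb", "googledrivestorage16tb"], "Google Drive Storage 16TB"),
    ("Google-Vault", "Google-Vault", ["vault", "googlevault"], "Google Vault"),
    ("Google-Vault-Former-Employee", "Google-Vault", ["vfe", "googlevaultformeremployee"], "Google Vault Former Employee"),
    ("Google-Coordinate", "Google-Coordinate", ["coordinate", "googlecoordinate"], "Google Coordinate"),
    ("Google-Chrome-Device-Management", "Google-Chrome-Device-Management", ["chrome", "cdm", "googlechromedevicemanagement"], "Google Chrome Device Management") ]

-- the for-loop of A: scan the table, return the first matching entry's product, else fall through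
def normalizeProductIdLoop (l product : String) : List (String × String × List String × String) → String
  | [] => product
  | (aSku, prod, aliases, dn) :: rest =>
    if l = PySem.Str.replace (PySem.Str.lower prod) "-" ""
        ∨ l = PySem.Str.replace (PySem.Str.lower aSku) "-" ""
        ∨ l ∈ aliases
        ∨ l = PySem.Str.replace (PySem.Str.lower dn) " " "" then
      prod
    else
      normalizeProductIdLoop l product rest

def normalizeProductId (product : String) : String :=
  normalizeProductIdLoop
    (PySem.Str.replace (PySem.Str.replace (PySem.Str.lower product) "-" "") " " "") product skuTable

-- ===== PORT B =====
-- _PRODUCT_MAP of Source B: the flat reverse-lookup dict literal (65 distinct keys)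
def productMap : PySem.Dict String String :=
  PySem.Dict.mk
  [ ("googleapps", "Google-Apps"),
    ("googleappsforbusiness", "Google-Apps"),
    ("gafb", "Google-Apps"),
    ("gafw", "Google-Apps"),
    ("basic", "Google-Apps"),
    ("gsuitebasic", "Google-Apps"),
    ("googleappsforgovernment", "Google-Apps"),
    ("gafg", "Google-Apps"),
    ("gsuitegovernment", "Google-Apps"),
    ("gsuitegov", "Google-Apps"),
    ("googleappsforpostini", "Google-Apps"),
    ("gams", "Google-Apps"),
    ("postini", "Google-Apps"),
    ("gsuitegams", "Google-Apps"),
    ("gsuitepostini", "Google-Apps"),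
    ("gsuitemessagesecurity", "Google-Apps"),
    ("googleappslite", "Google-Apps"),
    ("gal", "Google-Apps"),
    ("lite", "Google-Apps"),
    ("gsuitelite", "Google-Apps"),
    ("googleappsunlimited", "Google-Apps"),
    ("gau", "Google-Apps"),
    ("unlimited", "Google-Apps"),
    ("gsuitebusiness", "Google-Apps"),
    ("1010020020", "Google-Apps"),
    ("gae", "Google-Apps"),
    ("enterprise", "Google-Apps"),
    ("gsuiteenterprise", "Google-Apps"),
    ("googledrivestorage", "Google-Drive-storage"),
    ("googledrivestorage20gb", "Google-Drive-storage"),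
    ("drive20gb", "Google-Drive-storage"),
    ("20gb", "Google-Drive-storage"),
    ("googledrivestorage50gb", "Google-Drive-storage"),
    ("drive50gb", "Google-Drive-storage"),
    ("50gb", "Google-Drive-storage"),
    ("googledrivestorage200gb", "Google-Drive-storage"),
    ("drive200gb", "Google-Drive-storage"),
    ("200gb", "Google-Drive-storage"),
    ("googledrivestorage400gb", "Google-Drive-storage"),
    ("drive400gb", "Google-Drive-storage"),
    ("400gb", "Google-Drive-storage"),
    ("googledrivestorage1tb", "Google-Drive-storage"),
    ("drive1tb", "Google-Drive-storage"),
    ("1tb", "Google-Drive-storage"),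
    ("googledrivestorage2tb", "Google-Drive-storage"),
    ("drive2tb", "Google-Drive-storage"),
    ("2tb", "Google-Drive-storage"),
    ("googledrivestorage4tb", "Google-Drive-storage"),
    ("drive4tb", "Google-Drive-storage"),
    ("4tb", "Google-Drive-storage"),
    ("googledrivestorage8tb", "Google-Drive-storage"),
    ("drive8tb", "Google-Drive-storage"),
    ("8tb", "Google-Drive-storage"),
    ("googledrivestorage16tb", "Google-Drive-storage"),
    ("drive16tb", "Google-Drive-storage"),
    ("16tb", "Google-Drive-storage"),
    ("googlevault", "Google-Vault"),
    ("vault", "Google-Vault"),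
    ("googlevaultformeremployee", "Google-Vault"),
    ("vfe", "Google-Vault"),
    ("googlecoordinate", "Google-Coordinate"),
    ("coordinate", "Google-Coordinate"),
    ("googlechromedevicemanagement", "Google-Chrome-Device-Management"),
    ("chrome", "Google-Chrome-Device-Management"),
    ("cdm", "Google-Chrome-Device-Management") ]

def normalizeProductId_alt (product : String) : String :=
  PySem.Dict.getD productMap
    (PySem.Str.replace (PySem.Str.replace (PySem.Str.lower product) "-" "") " " "") product

-- ===== PRECONDITION & SPEC =====
def Spec_normalizeProductId (product : String) (out : String) : Prop := out = normalizeProductId_alt product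
instance (product : String) (out : String) : Decidable (Spec_normalizeProductId product out) := by unfold Spec_normalizeProductId; infer_instance

-- ===== CLAIM =====
def Claim_equal_normalizeProductId : Prop := ∀ (product : String), Dom_normalizeProductId product → Spec_normalizeProductId product (normalizeProductId product)

-- ===== LEMMAS AND PROOFS =====

-- the keys A's entry test accepts, in order
def lookupKeys (aSku prod dn : String) (aliases : List String) : List String :=
  [PySem.Str.replace (PySem.Str.lower prod) "-" "", PySem.Str.replace (PySem.Str.lower aSku) "-" ""]
    ++ aliases ++ [PySem.Str.replace (PySem.Str.lower dn) " " ""]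

-- first-match scan of the table as an Option
def scanOpt (l : String) : List (String × String × List String × String) → Option String
  | [] => none
  | (aSku, prod, aliases, dn) :: rest =>
    if l ∈ lookupKeys aSku prod dn aliases then some prod else scanOpt l rest

-- first value bound to l in a flat pair list
def firstVal (l : String) : List (String × String) → Option String
  | [] => none
  | (k, v) :: rest => if k = l then some v else firstVal l rest

-- the flat (key, product) pair list A's scan effectively searches
def pairsOf (t : List (String × String × List String × String)) : List (String × String) :=
  t.flatMap (fun e => (lookupKeys e.1 e.2.1 e.2.2.2 e.2.2.1).map (fun k => (k, e.2.1)))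

-- drop pairs whose key occurred before (first occurrence wins)
def dedupFst (seen : List String) : List (String × String) → List (String × String)
  | [] => []
  | (k, v) :: rest =>
    if k ∈ seen then dedupFst seen rest else (k, v) :: dedupFst (k :: seen) rest

-- pairsOf skuTable, evaluated (duplicates kept, in scan order)
def fullPairs : List (String × String) :=
  [ ("googleapps", "Google-Apps"),
    ("googleappsforbusiness", "Google-Apps"),
    ("gafb", "Google-Apps"),
    ("gafw", "Google-Apps"),
    ("basic", "Google-Apps"),
    ("gsuitebasic", "Google-Apps"),
    ("gsuitebasic", "Google-Apps"),
    ("googleapps", "Google-Apps"),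
    ("googleappsforgovernment", "Google-Apps"),
    ("gafg", "Google-Apps"),
    ("gsuitegovernment", "Google-Apps"),
    ("gsuitegov", "Google-Apps"),
    ("gsuitegovernment", "Google-Apps"),
    ("googleapps", "Google-Apps"),
    ("googleappsforpostini", "Google-Apps"),
    ("gams", "Google-Apps"),
    ("postini", "Google-Apps"),
    ("gsuitegams", "Google-Apps"),
    ("gsuitepostini", "Google-Apps"),
    ("gsuitemessagesecurity", "Google-Apps"),
    ("gsuitemessagesecurity", "Google-Apps"),
    ("googleapps", "Google-Apps"),
    ("googleappslite", "Google-Apps"),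
    ("gal", "Google-Apps"),
    ("lite", "Google-Apps"),
    ("gsuitelite", "Google-Apps"),
    ("gsuitelite", "Google-Apps"),
    ("googleapps", "Google-Apps"),
    ("googleappsunlimited", "Google-Apps"),
    ("gau", "Google-Apps"),
    ("unlimited", "Google-Apps"),
    ("gsuitebusiness", "Google-Apps"),
    ("gsuitebusiness", "Google-Apps"),
    ("googleapps", "Google-Apps"),
    ("1010020020", "Google-Apps"),
    ("gae", "Google-Apps"),
    ("enterprise", "Google-Apps"),
    ("gsuiteenterprise", "Google-Apps"),
    ("gsuiteenterprise", "Google-Apps"),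
    ("googledrivestorage", "Google-Drive-storage"),
    ("googledrivestorage20gb", "Google-Drive-storage"),
    ("drive20gb", "Google-Drive-storage"),
    ("20gb", "Google-Drive-storage"),
    ("googledrivestorage20gb", "Google-Drive-storage"),
    ("googledrivestorage20gb", "Google-Drive-storage"),
    ("googledrivestorage", "Google-Drive-storage"),
    ("googledrivestorage50gb", "Google-Drive-storage"),
    ("drive50gb", "Google-Drive-storage"),
    ("50gb", "Google-Drive-storage"),
    ("googledrivestorage50gb", "Google-Drive-storage"),
    ("googledrivestorage50gb", "Google-Drive-storage"),
    ("googledrivestorage", "Google-Drive-storage"),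
    ("googledrivestorage200gb", "Google-Drive-storage"),
    ("drive200gb", "Google-Drive-storage"),
    ("200gb", "Google-Drive-storage"),
    ("googledrivestorage200gb", "Google-Drive-storage"),
    ("googledrivestorage200gb", "Google-Drive-storage"),
    ("googledrivestorage", "Google-Drive-storage"),
    ("googledrivestorage400gb", "Google-Drive-storage"),
    ("drive400gb", "Google-Drive-storage"),
    ("400gb", "Google-Drive-storage"),
    ("googledrivestorage400gb", "Google-Drive-storage"),
    ("googledrivestorage400gb", "Google-Drive-storage"),
    ("googledrivestorage", "Google-Drive-storage"),
    ("googledrivestorage1tb", "Google-Drive-storage"),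
    ("drive1tb", "Google-Drive-storage"),
    ("1tb", "Google-Drive-storage"),
    ("googledrivestorage1tb", "Google-Drive-storage"),
    ("googledrivestorage1tb", "Google-Drive-storage"),
    ("googledrivestorage", "Google-Drive-storage"),
    ("googledrivestorage2tb", "Google-Drive-storage"),
    ("drive2tb", "Google-Drive-storage"),
    ("2tb", "Google-Drive-storage"),
    ("googledrivestorage2tb", "Google-Drive-storage"),
    ("googledrivestorage2tb", "Google-Drive-storage"),
    ("googledrivestorage", "Google-Drive-storage"),
    ("googledrivestorage4tb", "Google-Drive-storage"),
    ("drive4tb", "Google-Drive-storage"),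
    ("4tb", "Google-Drive-storage"),
    ("googledrivestorage4tb", "Google-Drive-storage"),
    ("googledrivestorage4tb", "Google-Drive-storage"),
    ("googledrivestorage", "Google-Drive-storage"),
    ("googledrivestorage8tb", "Google-Drive-storage"),
    ("drive8tb", "Google-Drive-storage"),
    ("8tb", "Google-Drive-storage"),
    ("googledrivestorage8tb", "Google-Drive-storage"),
    ("googledrivestorage8tb", "Google-Drive-storage"),
    ("googledrivestorage", "Google-Drive-storage"),
    ("googledrivestorage16tb", "Google-Drive-storage"),
    ("drive16tb", "Google-Drive-storage"),
    ("16tb", "Google-Drive-storage"),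
    ("googledrivestorage16tb", "Google-Drive-storage"),
    ("googledrivestorage16tb", "Google-Drive-storage"),
    ("googlevault", "Google-Vault"),
    ("googlevault", "Google-Vault"),
    ("vault", "Google-Vault"),
    ("googlevault", "Google-Vault"),
    ("googlevault", "Google-Vault"),
    ("googlevault", "Google-Vault"),
    ("googlevaultformeremployee", "Google-Vault"),
    ("vfe", "Google-Vault"),
    ("googlevaultformeremployee", "Google-Vault"),
    ("googlevaultformeremployee", "Google-Vault"),
    ("googlecoordinate", "Google-Coordinate"),
    ("googlecoordinate", "Google-Coordinate"),
    ("coordinate", "Google-Coordinate"),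
    ("googlecoordinate", "Google-Coordinate"),
    ("googlecoordinate", "Google-Coordinate"),
    ("googlechromedevicemanagement", "Google-Chrome-Device-Management"),
    ("googlechromedevicemanagement", "Google-Chrome-Device-Management"),
    ("chrome", "Google-Chrome-Device-Management"),
    ("cdm", "Google-Chrome-Device-Management"),
    ("googlechromedevicemanagement", "Google-Chrome-Device-Management"),
    ("googlechromedevicemanagement", "Google-Chrome-Device-Management") ]

lemma mem_lookupKeys_iff (l aSku prod dn : String) (aliases : List String) :
    l ∈ lookupKeys aSku prod dn aliases
      ↔ (l = PySem.Str.replace (PySem.Str.lower prod) "-" ""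
          ∨ l = PySem.Str.replace (PySem.Str.lower aSku) "-" ""
          ∨ l ∈ aliases
          ∨ l = PySem.Str.replace (PySem.Str.lower dn) " " "") := by
  simp [lookupKeys]

lemma loop_eq_scanOpt (l product : String) (t : List (String × String × List String × String)) :
    normalizeProductIdLoop l product t = (scanOpt l t).getD product := by
  induction t with
  | nil => simp [normalizeProductIdLoop, scanOpt]
  | cons e t ih =>
    obtain ⟨aSku, prod, aliases, dn⟩ := e
    simp only [normalizeProductIdLoop, scanOpt]
    split_ifs with h1 h2 h2
    · rfl
    · exact absurd ((mem_lookupKeys_iff l aSku prod dn aliases).mpr h1) h2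
    · exact absurd ((mem_lookupKeys_iff l aSku prod dn aliases).mp h2) h1
    · exact ih

lemma firstVal_map_keys (l p : String) (ks : List String) (rest : List (String × String)) :
    firstVal l (ks.map (fun k => (k, p)) ++ rest)
      = if l ∈ ks then some p else firstVal l rest := by
  induction ks with
  | nil => simp
  | cons k ks ih =>
    simp only [List.map_cons, List.cons_append, firstVal, ih, List.mem_cons]
    by_cases hk : k = l
    · subst hk; simp
    · simp [hk, Ne.symm hk]

lemma scanOpt_eq_firstVal (l : String) (t : List (String × String × List String × String)) :
    scanOpt l t = firstVal l (pairsOf t) := by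
  induction t with
  | nil => simp [scanOpt, pairsOf, firstVal]
  | cons e t ih =>
    obtain ⟨aSku, prod, aliases, dn⟩ := e
    simp only [scanOpt, pairsOf, List.flatMap_cons, firstVal_map_keys]
    rw [ih]; rfl

lemma firstVal_dedupFst (l : String) (seen : List String) (ps : List (String × String))
    (hl : l ∉ seen) : firstVal l (dedupFst seen ps) = firstVal l ps := by
  induction ps generalizing seen with
  | nil => rfl
  | cons p ps ih =>
    obtain ⟨k, v⟩ := p
    simp only [dedupFst, firstVal]
    by_cases hs : k ∈ seen
    · have hk : k ≠ l := fun h => hl (h ▸ hs)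
      simp [hs, hk, ih seen hl]
    · simp only [if_neg hs, firstVal]
      by_cases hk : k = l
      · simp [hk]
      · have : l ∉ k :: seen := by
          intro h; rcases List.mem_cons.mp h with h | h
          · exact hk h.symm
          · exact hl h
        simp [hk, ih (k :: seen) this]

lemma get?_mk_eq_firstVal (l : String) (ps : List (String × String)) :
    (PySem.Dict.mk ps).get? l = firstVal l ps := by
  induction ps with
  | nil => rfl
  | cons p ps ih =>
    obtain ⟨k, v⟩ := p
    rw [PySem.Dict.get?_mk_cons, firstVal]
    by_cases hk : k = l
    · simp [hk]
    · simp [hk, ih]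

set_option maxRecDepth 20000 in
lemma pairsOf_skuTable : pairsOf skuTable = fullPairs := by decide

set_option maxRecDepth 20000 in
lemma dedup_fullPairs : dedupFst [] fullPairs = productMap.items := by decide

-- ===== VERDICT =====
theorem normalizeProductId_spec : Claim_equal_normalizeProductId := by
  intro product _
  unfold Spec_normalizeProductId normalizeProductId normalizeProductId_alt
  rw [PySem.Dict.getD_eq_get?_getD, loop_eq_scanOpt, scanOpt_eq_firstVal, pairsOf_skuTable,
    ← firstVal_dedupFst _ [] fullPairs (List.not_mem_nil), dedup_fullPairs,
    ← get?_mk_eq_firstVal]
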